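-- pv_equiv track=rewrite | github.com/TechBuckler/Code_Logic | backup/optimizer.py | find_redundant_conditions
-- ===== SOURCE A (Python) =====
-- def find_redundant_conditions(logic):
--     """Find redundant conditions in the logic."""
--     redundant = []
--
--     # This is a simplified implementation
--     # A real implementation would use a SAT solver or similar
--     for i, rule1 in enumerate(logic):
--         for j, rule2 in enumerate(logic):
--             if i != j and rule1['return'] == rule2['return']:
--                 # Check if rule1's condition implies rule2's
--                 # This is a very simplified check
--                 if rule1['condition'] in rule2['condition']:
--                     redundant.append((j, f"Condition {rule2['condition']} is redundant with {rule1['condition']}"))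
--
--     return redundant
-- ===== SOURCE B (Python) =====
-- def find_redundant_conditions(logic):
--     """Find redundant conditions in the logic."""
--     # Group (index, rule) pairs by their 'return' value, preserving order,
--     # so each rule is only compared against rules with the same return.
--     groups = {}
--     for idx, rule in enumerate(logic):
--         key = rule.get('return')
--         groups[key] = groups.get(key, []) + [(idx, rule)]
--
--     redundant = []
--     for i, rule1 in enumerate(logic):
--         for j, rule2 in groups.get(rule1.get('return'), []):
--             if j != i and rule1['condition'] in rule2['condition']:
--                 redundant.append((j, f"Condition {rule2['condition']} is redundant with {rule1['condition']}"))
--     return redundant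
-- ===== Notes on version B (the rewrite author's own statement) =====
-- stated objective: alternative
-- what changed: B first builds a dict grouping (index, rule) pairs by each rule's 'return' value, then compares each rule only against its own group's list, instead of A's nested scan over all pairs of rules.
import Mathlib
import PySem

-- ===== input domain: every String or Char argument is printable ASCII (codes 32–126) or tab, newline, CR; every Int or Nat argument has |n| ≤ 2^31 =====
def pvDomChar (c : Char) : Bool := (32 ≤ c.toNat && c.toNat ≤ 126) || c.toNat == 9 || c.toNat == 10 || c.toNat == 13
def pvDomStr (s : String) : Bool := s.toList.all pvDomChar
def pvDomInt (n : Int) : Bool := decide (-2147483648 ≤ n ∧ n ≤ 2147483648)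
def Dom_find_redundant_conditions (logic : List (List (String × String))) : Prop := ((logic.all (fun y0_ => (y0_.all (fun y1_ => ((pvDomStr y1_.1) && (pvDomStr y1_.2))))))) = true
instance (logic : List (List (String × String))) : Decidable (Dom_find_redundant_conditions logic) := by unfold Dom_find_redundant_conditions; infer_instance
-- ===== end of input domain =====

-- ===== PORT A =====
-- B replaces the inner scan over all rules by a lookup in a dict grouping rules by their 'return' value (alternative decomposition); return-value equivalence only.
-- shared field accessors (each rule is a Python dict, ported as an association list read through PySem.Dict.ofList)
def pvRet (r : List (String × String)) : Option String := (PySem.Dict.ofList r).get? "return"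
def pvRetD (r : List (String × String)) : String := (PySem.Dict.ofList r).getD "return" ""
def pvCond (r : List (String × String)) : String := (PySem.Dict.ofList r).getD "condition" ""
def pvMsg (c2 c1 : String) : String := "Condition " ++ c2 ++ " is redundant with " ++ c1

def find_redundant_conditions (logic : List (List (String × String))) : List (Int × String) :=
  (PySem.List.enumerate logic).foldl (fun red p =>
    (PySem.List.enumerate logic).foldl (fun red q =>
      if p.1 ≠ q.1 ∧ pvRetD p.2 = pvRetD q.2 then
        if PySem.Str.isIn (pvCond p.2) (pvCond q.2) then
          red ++ [(q.1, pvMsg (pvCond q.2) (pvCond p.2))]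
        else red
      else red) red) []

-- ===== PORT B =====
-- groups[key] = groups.get(key, []) + [(idx, rule)]   (d[k] = f(d.get(k, dflt)) is Dict.modify)
def pvGroups (logic : List (List (String × String))) :
    PySem.Dict (Option String) (List (Int × List (String × String))) :=
  (PySem.List.enumerate logic).foldl
    (fun g p => g.modify (pvRet p.2) [] (· ++ [p])) PySem.Dict.empty

def find_redundant_conditions_alt (logic : List (List (String × String))) : List (Int × String) :=
  let groups := pvGroups logic
  (PySem.List.enumerate logic).foldl (fun red p =>
    (groups.getD (pvRet p.2) []).foldl (fun red q =>
      if q.1 ≠ p.1 ∧ PySem.Str.isIn (pvCond p.2) (pvCond q.2) then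
        red ++ [(q.1, pvMsg (pvCond q.2) (pvCond p.2))]
      else red) red) []

-- ===== PRECONDITION & SPEC =====
-- Pre_ excludes exactly the inputs where Python A raises KeyError: with two or more rules it reads
-- every rule's 'return', and reads 'condition' of both rules of every distinct-index pair with equal returns.
def Pre_find_redundant_conditions (logic : List (List (String × String))) : Prop :=
  logic.length ≤ 1 ∨
    ((∀ r ∈ logic, ((PySem.Dict.ofList r).get? "return").isSome = true) ∧
     (∀ p ∈ PySem.List.enumerate logic, ∀ q ∈ PySem.List.enumerate logic,
        p.1 ≠ q.1 →
        (PySem.Dict.ofList p.2).get? "return" = (PySem.Dict.ofList q.2).get? "return" →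
        ((PySem.Dict.ofList p.2).get? "condition").isSome = true))
instance (logic : List (List (String × String))) : Decidable (Pre_find_redundant_conditions logic) := by
  unfold Pre_find_redundant_conditions; infer_instance

def pvWitness_find_redundant_conditions : (List (List (String × String))) :=
  [[("return", "a"), ("condition", "x")], [("return", "a"), ("condition", "xy")]]

def Spec_find_redundant_conditions (logic : List (List (String × String))) (out : List (Int × String)) : Prop := out = find_redundant_conditions_alt logic
instance (logic : List (List (String × String))) (out : List (Int × String)) : Decidable (Spec_find_redundant_conditions logic out) := by unfold Spec_find_redundant_conditions; infer_instance

-- ===== CLAIM (what is proved, stated in full; the proofs are below) =====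
def Claim_equal_find_redundant_conditions : Prop := ∀ (logic : List (List (String × String))), Dom_find_redundant_conditions logic → Pre_find_redundant_conditions logic → Spec_find_redundant_conditions logic (find_redundant_conditions logic)

-- ===== LEMMAS AND PROOFS =====

-- the group dict looked up at k is exactly the enumerate list filtered to return value k
lemma pvGroups_getD (logic : List (List (String × String))) (k : Option String) :
    (pvGroups logic).getD k [] =
      (PySem.List.enumerate logic).filter (fun p => pvRet p.2 == k) := by
  unfold pvGroups
  have hmap : ((PySem.List.enumerate logic).map (fun p => (pvRet p.2, p))).foldl
        (fun g x => g.modify x.1 [] (· ++ [x.2])) PySem.Dict.empty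
      = (PySem.List.enumerate logic).foldl
        (fun g p => g.modify (pvRet p.2) [] (· ++ [p])) PySem.Dict.empty := by
    simp [List.foldl_map]
  rw [← hmap, PySem.Dict.getD_foldl_modify_append]
  simp [List.filter_map, Function.comp_def]

-- one inner-loop step of B (with its group-membership test made explicit) equals one inner-loop step of A
lemma pvStep_eq (p q : Int × List (String × String)) (red : List (Int × String))
    (h : p.1 ≠ q.1 → (pvRet p.2).isSome = true ∧ (pvRet q.2).isSome = true) :
    (if pvRet q.2 == pvRet p.2 then
       (if q.1 ≠ p.1 ∧ PySem.Str.isIn (pvCond p.2) (pvCond q.2) then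
          red ++ [(q.1, pvMsg (pvCond q.2) (pvCond p.2))]
        else red)
     else red)
    = (if p.1 ≠ q.1 ∧ pvRetD p.2 = pvRetD q.2 then
         (if PySem.Str.isIn (pvCond p.2) (pvCond q.2) then
            red ++ [(q.1, pvMsg (pvCond q.2) (pvCond p.2))]
          else red)
       else red) := by
  by_cases hij : p.1 = q.1
  · simp [hij]
  · obtain ⟨h1, h2⟩ := h hij
    obtain ⟨a1, ha1⟩ := Option.isSome_iff_exists.mp h1
    obtain ⟨a2, ha2⟩ := Option.isSome_iff_exists.mp h2
    have hr1 : pvRetD p.2 = a1 := by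
      simp [pvRetD, PySem.Dict.getD_eq_get?_getD, pvRet] at ha1 ⊢; simp [ha1]
    have hr2 : pvRetD q.2 = a2 := by
      simp [pvRetD, PySem.Dict.getD_eq_get?_getD, pvRet] at ha2 ⊢; simp [ha2]
    by_cases hk : a1 = a2
    · simp [ha1, ha2, hk, hr1, hr2, hij, Ne.symm hij]
    · have hk' : ¬ a2 = a1 := fun h => hk h.symm
      simp [ha1, ha2, hr1, hr2, hk, hk']

-- ===== VERDICT (by name: the statement is the Claim_ definition above) =====
theorem find_redundant_conditions_spec : Claim_equal_find_redundant_conditions := by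
  intro logic _ hpre
  unfold Spec_find_redundant_conditions
  have H : ∀ p ∈ PySem.List.enumerate logic, ∀ q ∈ PySem.List.enumerate logic,
      p.1 ≠ q.1 → (pvRet p.2).isSome = true ∧ (pvRet q.2).isSome = true := by
    intro p hp q hq hne
    rcases hpre with hlen | ⟨hsome, _⟩
    · exfalso
      obtain ⟨i, hi, rfl⟩ := (PySem.List.mem_enumerate_iff _ _ _).mp hp
      obtain ⟨j, hj, rfl⟩ := (PySem.List.mem_enumerate_iff _ _ _).mp hq
      simp at hne
      omega
    · obtain ⟨i, hi, rfl⟩ := (PySem.List.mem_enumerate_iff _ _ _).mp hp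
      obtain ⟨j, hj, rfl⟩ := (PySem.List.mem_enumerate_iff _ _ _).mp hq
      exact ⟨hsome _ (logic.getElem_mem hi), hsome _ (logic.getElem_mem hj)⟩
  unfold find_redundant_conditions find_redundant_conditions_alt
  simp only [pvGroups_getD, List.foldl_filter]
  apply PySem.List.foldl_congr_mem _ _ _
  intro red p hp
  refine (PySem.List.foldl_congr_mem _ _ _ _ ?_).symm
  intro red2 q hq
  exact pvStep_eq p q red2 (H p hp q hq)
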